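-- pv_equiv track=rewrite | github.com/JJGeither/AutoDataIntegration | DataIntegrator.py | categorize_column
-- ===== SOURCE A (Python) =====
-- CATEGORY_THRESHOLD = 10
--
-- def levenshtein_distance(str1, str2):
--     """
--     Calculates the Levenshtein distance between two strings.
--
--     Args:
--         str1 (str): The first string.
--         str2 (str): The second string.
--
--     Returns:
--         int: The Levenshtein distance.
--     """
--     m, n = len(str1), len(str2)
--     dp = [[0] * (n + 1) for _ in range(m + 1)]
--
--     # Initialize base cases
--     for i in range(m + 1):
--         dp[i][0] = i
--     for j in range(n + 1):
--         dp[0][j] = j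
--
--     # Compute the distances
--     for i in range(1, m + 1):
--         for j in range(1, n + 1):
--             cost = 0 if str1[i - 1] == str2[j - 1] else 1
--             dp[i][j] = min(
--                 dp[i - 1][j] + 1,
--                 dp[i][j - 1] + 1,
--                 dp[i - 1][j - 1] + cost
--             )
--
--     return dp[m][n]  # Return the distance
--
-- def categorize_column(column_name, categories):
--     """
--     Categorizes a column based on the minimum Levenshtein distance
--     compared to known categories.
--
--     Args:
--         column_name (str): The name of the column to categorize.
--         categories (list): A list of category names and variations.
--
--     Returns:
--         str: The category assigned to the column.
--     """
--     current_category = "etc"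
--     min_distance = CATEGORY_THRESHOLD
--
--     for category_row in categories[1:]:  # Skip the header
--         category_name = category_row[0]
--         for other_name in category_row[1:]:
--             distance = levenshtein_distance(other_name.lower(), column_name.lower())
--             if distance < min_distance:
--                 min_distance = distance
--                 current_category = category_name
--
--     return current_category
-- ===== SOURCE B (Python) =====
-- CATEGORY_THRESHOLD = 10
--
-- def levenshtein_distance(str1, str2):
--     """Top-down memoized Levenshtein: lev(i, j) over prefix lengths, cached in a dict."""
--     memo = {}
--
--     def lev(i, j):
--         if i == 0:
--             return j
--         if j == 0:
--             return i
--         key = (i, j)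
--         if key not in memo:
--             cost = 0 if str1[i - 1] == str2[j - 1] else 1
--             memo[key] = min(lev(i - 1, j) + 1,
--                             lev(i, j - 1) + 1,
--                             lev(i - 1, j - 1) + cost)
--         return memo[key]
--
--     return lev(len(str1), len(str2))
--
-- def categorize_column(column_name, categories):
--     current_category = "etc"
--     min_distance = CATEGORY_THRESHOLD
--
--     for category_row in categories[1:]:  # Skip the header
--         category_name = category_row[0]
--         for other_name in category_row[1:]:
--             distance = levenshtein_distance(other_name.lower(), column_name.lower())
--             if distance < min_distance:
--                 min_distance = distance
--                 current_category = category_name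
--
--     return current_category
-- ===== Notes on version B (the rewrite author's own statement) =====
-- stated objective: alternative
-- what changed: levenshtein_distance is reimplemented as a top-down memoized recursion lev(i, j) over prefix lengths with a dict cache, instead of filling a bottom-up (m+1)x(n+1) dp matrix with nested loops; the outer categorization loop, threshold and tie-breaking are unchanged.
import Mathlib
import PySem

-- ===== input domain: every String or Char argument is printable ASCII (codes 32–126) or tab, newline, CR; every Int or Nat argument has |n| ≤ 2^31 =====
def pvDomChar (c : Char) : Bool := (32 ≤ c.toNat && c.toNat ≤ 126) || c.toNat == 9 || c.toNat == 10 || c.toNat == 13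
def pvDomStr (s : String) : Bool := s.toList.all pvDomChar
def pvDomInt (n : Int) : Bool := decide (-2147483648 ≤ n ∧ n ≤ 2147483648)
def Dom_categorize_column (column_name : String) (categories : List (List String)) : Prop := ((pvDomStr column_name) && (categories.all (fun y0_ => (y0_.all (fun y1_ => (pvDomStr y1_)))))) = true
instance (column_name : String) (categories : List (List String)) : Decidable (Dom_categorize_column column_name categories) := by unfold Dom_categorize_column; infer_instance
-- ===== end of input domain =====

-- B replaces A's bottom-up Levenshtein dp matrix by a top-down memoized recursion on prefix lengths (objective: alternative decomposition, same asymptotic cost).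

-- ===== PORT A =====
-- levenshtein_distance of Source A: full (m+1)×(n+1) dp matrix, filled by the three loops.
-- str1[i-1]/str2[j-1] and all dp reads are in range here, so getD is exact.
def pvLevMatrix (str1 str2 : List Char) : Nat :=
  let m := str1.length
  let n := str2.length
  -- dp = [[0] * (n + 1) for _ in range(m + 1)]
  let dp : List (List Nat) := (List.range (m + 1)).map (fun _ => List.replicate (n + 1) 0)
  -- for i in range(m + 1): dp[i][0] = i
  let dp := (List.range (m + 1)).foldl (fun dp i => dp.set i ((dp.getD i []).set 0 i)) dp
  -- for j in range(n + 1): dp[0][j] = j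
  let dp := (List.range (n + 1)).foldl (fun dp j => dp.set 0 ((dp.getD 0 []).set j j)) dp
  -- for i in range(1, m + 1): for j in range(1, n + 1): …   (i = i0 + 1, j = j0 + 1)
  let dp := (List.range m).foldl (fun dp i0 =>
      (List.range n).foldl (fun dp j0 =>
        let i := i0 + 1
        let j := j0 + 1
        let cost : Nat := if str1.getD (i - 1) ' ' = str2.getD (j - 1) ' ' then 0 else 1
        let v := min (min ((dp.getD (i - 1) []).getD j 0 + 1)
                          ((dp.getD i []).getD (j - 1) 0 + 1))
                     ((dp.getD (i - 1) []).getD (j - 1) 0 + cost)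
        dp.set i ((dp.getD i []).set j v)) dp) dp
  (dp.getD m []).getD n 0

def categorize_column (column_name : String) (categories : List (List String)) : String :=
  -- rows after the header are nonempty by Pre_, so category_row[0] is row.headD ""
  let r := (categories.drop 1).foldl (fun st row =>
    let name := row.headD ""
    (row.drop 1).foldl (fun st other =>
      let d := pvLevMatrix (PySem.Str.lower other).toList (PySem.Str.lower column_name).toList
      if d < st.2 then (name, d) else st) st) ("etc", 10)
  r.1

-- ===== PORT B =====
-- lev(i, j) of Source B; the dict memo only caches values of this pure recursion (an evaluation
-- strategy, not a different value), so the port is the recursion itself.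
def pvLevRec (str1 str2 : List Char) : Nat → Nat → Nat
  | 0, j => j
  | i + 1, 0 => i + 1
  | i + 1, j + 1 =>
    let cost : Nat := if str1.getD i ' ' = str2.getD j ' ' then 0 else 1
    min (min (pvLevRec str1 str2 i (j + 1) + 1) (pvLevRec str1 str2 (i + 1) j + 1)) (pvLevRec str1 str2 i j + cost)

def pvLevMemo (str1 str2 : List Char) : Nat := pvLevRec str1 str2 str1.length str2.length

def categorize_column_alt (column_name : String) (categories : List (List String)) : String :=
  let r := (categories.drop 1).foldl (fun st row =>
    let name := row.headD ""
    (row.drop 1).foldl (fun st other =>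
      let d := pvLevMemo (PySem.Str.lower other).toList (PySem.Str.lower column_name).toList
      if d < st.2 then (name, d) else st) st) ("etc", 10)
  r.1

-- ===== PRECONDITION & SPEC =====
-- Pre_ excludes only inputs on which Python A raises: an empty row after the header makes
-- category_row[0] an IndexError (B raises there too).
def Pre_categorize_column (column_name : String) (categories : List (List String)) : Prop :=
  ∀ row ∈ categories.drop 1, row ≠ []
instance (column_name : String) (categories : List (List String)) : Decidable (Pre_categorize_column column_name categories) := by unfold Pre_categorize_column; infer_instance

def pvWitness_categorize_column : String × List (List String) := ("age", [["header"], ["age", "years"], ["name", "title"]])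

def Spec_categorize_column (column_name : String) (categories : List (List String)) (out : String) : Prop := out = categorize_column_alt column_name categories
instance (column_name : String) (categories : List (List String)) (out : String) : Decidable (Spec_categorize_column column_name categories out) := by unfold Spec_categorize_column; infer_instance

-- ===== CLAIM (what is proved, stated in full; the proofs are below) =====
def Claim_equal_categorize_column : Prop := ∀ (column_name : String) (categories : List (List String)), Dom_categorize_column column_name categories → Pre_categorize_column column_name categories → Spec_categorize_column column_name categories (categorize_column column_name categories)

-- ===== LEMMAS AND PROOFS =====

theorem pv_getD_set_self {α : Type} (l : List α) (i : Nat) (a d : α) (h : i < l.length) :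
    (l.set i a).getD i d = a := by
  simp [List.getD_eq_getElem?_getD, h]

theorem pv_getD_set_ne {α : Type} (l : List α) {i j : Nat} (a : α) (d : α) (h : i ≠ j) :
    (l.set i a).getD j d = l.getD j d := by
  simp [List.getD_eq_getElem?_getD, h]

-- cell read of the dp matrix
def pvG (dp : List (List Nat)) (i j : Nat) : Nat := (dp.getD i []).getD j 0

-- the matrix after the two base-case loops of A
def pvInit (m n : Nat) : List (List Nat) :=
  let dp : List (List Nat) := (List.range (m + 1)).map (fun _ => List.replicate (n + 1) 0)
  let dp := (List.range (m + 1)).foldl (fun dp i => dp.set i ((dp.getD i []).set 0 i)) dp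
  (List.range (n + 1)).foldl (fun dp j => dp.set 0 ((dp.getD 0 []).set j j)) dp

-- the body of A's innermost loop (cell (i0+1, j0+1))
def pvStep (str1 str2 : List Char) (i0 : Nat) (dp : List (List Nat)) (j0 : Nat) : List (List Nat) :=
  let i := i0 + 1
  let j := j0 + 1
  let cost : Nat := if str1.getD (i - 1) ' ' = str2.getD (j - 1) ' ' then 0 else 1
  let v := min (min ((dp.getD (i - 1) []).getD j 0 + 1)
                    ((dp.getD i []).getD (j - 1) 0 + 1))
               ((dp.getD (i - 1) []).getD (j - 1) 0 + cost)
  dp.set i ((dp.getD i []).set j v)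

theorem pvStep_eq (str1 str2 : List Char) (i0 : Nat) (dp : List (List Nat)) (j0 : Nat) :
    pvStep str1 str2 i0 dp j0 =
      dp.set (i0 + 1) ((dp.getD (i0 + 1) []).set (j0 + 1)
        (min (min ((dp.getD i0 []).getD (j0 + 1) 0 + 1)
                  ((dp.getD (i0 + 1) []).getD j0 0 + 1))
             ((dp.getD i0 []).getD j0 0 + (if str1.getD i0 ' ' = str2.getD j0 ' ' then 0 else 1)))) := by
  rfl

theorem pvFold1 (m n : Nat) (dp0 : List (List Nat)) (hlen : dp0.length = m + 1)
    (hrow : ∀ k, k ≤ m → dp0.getD k [] = List.replicate (n + 1) 0) :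
    ∀ a, a ≤ m + 1 →
    (let dp := (List.range a).foldl (fun dp i => dp.set i ((dp.getD i []).set 0 i)) dp0
     dp.length = m + 1 ∧
     ∀ k, k ≤ m → dp.getD k [] = (if k < a then (List.replicate (n + 1) 0).set 0 k else List.replicate (n + 1) 0)) := by
  intro a
  induction a with
  | zero => intro _; exact ⟨hlen, fun k hk => by simpa using hrow k hk⟩
  | succ a ih =>
    intro ha
    obtain ⟨hlen', hget⟩ := ih (Nat.le_of_succ_le ha)
    rw [List.range_succ, List.foldl_append, List.foldl_cons, List.foldl_nil]
    refine ⟨by rw [List.length_set]; exact hlen', ?_⟩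
    intro k hk
    by_cases hka : k = a
    · subst hka
      rw [pv_getD_set_self _ _ _ _ (by omega), hget k hk]
      simp
    · rw [pv_getD_set_ne (h := Ne.symm hka), hget k hk]
      by_cases h : k < a
      · rw [if_pos h, if_pos (by omega)]
      · rw [if_neg h, if_neg (by omega)]

theorem pvFold2 (n : Nat) (dp1 : List (List Nat)) (hlen : 0 < dp1.length)
    (hrow0len : (dp1.getD 0 []).length = n + 1)
    (hrow0 : ∀ j, j ≤ n → (dp1.getD 0 []).getD j 0 = 0) :
    ∀ b, b ≤ n + 1 →
    (let dp := (List.range b).foldl (fun dp j => dp.set 0 ((dp.getD 0 []).set j j)) dp1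
     dp.length = dp1.length ∧
     (∀ k, k ≠ 0 → dp.getD k [] = dp1.getD k []) ∧
     (dp.getD 0 []).length = n + 1 ∧
     ∀ j, j ≤ n → (dp.getD 0 []).getD j 0 = if j < b then j else 0) := by
  intro b
  induction b with
  | zero =>
    intro _
    exact ⟨rfl, fun _ _ => rfl, hrow0len, fun j hj => by
      simp only [List.range_zero, List.foldl_nil]
      rw [hrow0 j hj]; simp⟩
  | succ b ih =>
    intro hb
    obtain ⟨hlen', hother, hr0len, hr0⟩ := ih (Nat.le_of_succ_le hb)
    rw [List.range_succ, List.foldl_append, List.foldl_cons, List.foldl_nil]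
    refine ⟨by rw [List.length_set]; exact hlen', ?_, ?_, ?_⟩
    · intro k hk
      rw [pv_getD_set_ne (h := Ne.symm hk)]
      exact hother k hk
    · rw [pv_getD_set_self _ _ _ _ (by omega), List.length_set]
      exact hr0len
    · intro j hj
      rw [pv_getD_set_self _ _ _ _ (by omega)]
      by_cases hjb : j = b
      · subst hjb
        rw [pv_getD_set_self _ _ _ _ (by omega), if_pos (by omega)]
      · rw [pv_getD_set_ne (h := Ne.symm hjb), hr0 j hj]
        by_cases h : j < b
        · rw [if_pos h, if_pos (by omega)]
        · rw [if_neg h, if_neg (by omega)]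

theorem pvInit_spec (m n : Nat) :
    (pvInit m n).length = m + 1 ∧
    (∀ k, k ≤ m → ((pvInit m n).getD k []).length = n + 1) ∧
    (∀ i, i ≤ m → pvG (pvInit m n) i 0 = i) ∧
    (∀ j, j ≤ n → pvG (pvInit m n) 0 j = j) ∧
    (∀ i j, 1 ≤ i → i ≤ m → 1 ≤ j → pvG (pvInit m n) i j = 0) := by
  have hd0len : ((List.range (m + 1)).map (fun _ => List.replicate (n + 1) (0:Nat))).length = m + 1 := by simp
  have hd0row : ∀ k, k ≤ m → ((List.range (m + 1)).map (fun _ => List.replicate (n + 1) (0:Nat))).getD k [] = List.replicate (n + 1) 0 := by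
    intro k hk
    simp [List.getD_eq_getElem?_getD, Nat.lt_succ_of_le hk]
  obtain ⟨h1len, h1row⟩ := pvFold1 m n _ hd0len hd0row (m + 1) (le_refl _)
  have h1row' : ∀ k, k ≤ m → (List.foldl (fun dp i => dp.set i ((dp.getD i []).set 0 i))
      ((List.range (m + 1)).map (fun _ => List.replicate (n + 1) 0)) (List.range (m + 1))).getD k []
      = (List.replicate (n + 1) 0).set 0 k := by
    intro k hk
    rw [h1row k hk, if_pos (by omega)]
  obtain ⟨h2len, h2other, h2r0len, h2r0⟩ := pvFold2 n _ (by rw [h1len]; omega)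
    (by rw [h1row' 0 (by omega)]; simp)
    (by intro j hj
        rw [h1row' 0 (by omega)]
        by_cases hj0 : j = 0
        · subst hj0; rw [pv_getD_set_self _ _ _ _ (by simp)]
        · rw [pv_getD_set_ne (h := Ne.symm hj0)]
          simp [List.getD_eq_getElem?_getD, List.getElem?_replicate]
          split <;> rfl)
    (n + 1) (le_refl _)
  refine ⟨by rw [pvInit, h2len, h1len], ?_, ?_, ?_, ?_⟩
  · intro k hk
    by_cases hk0 : k = 0
    · subst hk0; exact h2r0len
    · show ((pvInit m n).getD k []).length = n + 1
      rw [pvInit, h2other k hk0, h1row' k hk]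
      simp
  · intro i hi
    by_cases hi0 : i = 0
    · subst hi0
      show pvG (pvInit m n) 0 0 = 0
      rw [pvG, pvInit, h2r0 0 (by omega), if_pos (by omega)]
    · rw [pvG, pvInit, h2other i hi0, h1row' i hi, pv_getD_set_self _ _ _ _ (by simp)]
  · intro j hj
    rw [pvG, pvInit, h2r0 j hj, if_pos (by omega)]
  · intro i j hi1 him hj1
    rw [pvG, pvInit, h2other i (by omega), h1row' i him,
        pv_getD_set_ne (h := by omega)]
    simp [List.getD_eq_getElem?_getD, List.getElem?_replicate]
    split <;> rfl

theorem pvInner_spec (str1 str2 : List Char) (m n : Nat)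
    (i0 : Nat) (hi : i0 < m) (dp : List (List Nat))
    (hlen : dp.length = m + 1)
    (hrlen : ∀ k, k ≤ m → (dp.getD k []).length = n + 1)
    (hprev : ∀ j, j ≤ n → pvG dp i0 j = pvLevRec str1 str2 i0 j)
    (hi0 : pvG dp (i0 + 1) 0 = i0 + 1) :
    ∀ c, c ≤ n →
      (let dp' := (List.range c).foldl (pvStep str1 str2 i0) dp
       dp'.length = m + 1 ∧
       (∀ k, k ≠ i0 + 1 → dp'.getD k [] = dp.getD k []) ∧
       (∀ k, k ≤ m → (dp'.getD k []).length = n + 1) ∧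
       (∀ j, j ≤ c → pvG dp' (i0 + 1) j = pvLevRec str1 str2 (i0 + 1) j) ∧
       (∀ j, c < j → pvG dp' (i0 + 1) j = pvG dp (i0 + 1) j)) := by
  intro c
  induction c with
  | zero =>
    intro _
    simp only [List.range_zero, List.foldl_nil]
    refine ⟨hlen, by simp, hrlen, ?_, by simp⟩
    intro j hj
    interval_cases j
    rw [hi0, pvLevRec]
  | succ c ih =>
    intro hc
    obtain ⟨hlen', hother, hrlen', hdone, hfresh⟩ := ih (Nat.le_of_succ_le hc)
    rw [List.range_succ, List.foldl_append, List.foldl_cons, List.foldl_nil]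
    generalize hdpc : (List.range c).foldl (pvStep str1 str2 i0) dp = dpc at *
    rw [pvStep_eq]
    have hreadA : (dpc.getD i0 []).getD (c + 1) 0 = pvLevRec str1 str2 i0 (c + 1) := by
      have h := hother i0 (by omega)
      show pvG dpc i0 (c + 1) = _
      rw [pvG, h]
      exact hprev (c + 1) hc
    have hreadB : (dpc.getD (i0 + 1) []).getD c 0 = pvLevRec str1 str2 (i0 + 1) c :=
      hdone c (le_refl _)
    have hreadC : (dpc.getD i0 []).getD c 0 = pvLevRec str1 str2 i0 c := by
      have h := hother i0 (by omega)
      show pvG dpc i0 c = _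
      rw [pvG, h]
      exact hprev c (by omega)
    rw [hreadA, hreadB, hreadC]
    have hval : min (min (pvLevRec str1 str2 i0 (c + 1) + 1) (pvLevRec str1 str2 (i0 + 1) c + 1))
                     (pvLevRec str1 str2 i0 c + (if str1.getD i0 ' ' = str2.getD c ' ' then 0 else 1))
                = pvLevRec str1 str2 (i0 + 1) (c + 1) := by
      conv_rhs => rw [pvLevRec]
    rw [hval]
    have hlt : i0 + 1 < dpc.length := by omega
    have hrowlt : c + 1 < ((dpc.getD (i0 + 1) []).length) := by
      rw [hrlen' (i0 + 1) (by omega)]; omega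
    refine ⟨by rw [List.length_set]; exact hlen', ?_, ?_, ?_, ?_⟩
    · intro k hk
      rw [pv_getD_set_ne (h := Ne.symm hk)]
      exact hother k hk
    · intro k hk
      by_cases hki : k = i0 + 1
      · subst hki
        rw [pv_getD_set_self _ _ _ _ hlt, List.length_set]
        exact hrlen' _ hk
      · rw [pv_getD_set_ne (h := Ne.symm hki)]
        exact hrlen' _ hk
    · intro j hj
      by_cases hjc : j = c + 1
      · subst hjc
        rw [pvG, pv_getD_set_self _ _ _ _ hlt, pv_getD_set_self _ _ _ _ hrowlt]
      · rw [pvG, pv_getD_set_self _ _ _ _ hlt, pv_getD_set_ne (h := Ne.symm hjc)]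
        exact hdone j (by omega)
    · intro j hj
      rw [pvG, pv_getD_set_self _ _ _ _ hlt, pv_getD_set_ne (h := by omega)]
      exact hfresh j (by omega)

theorem pvOuter_spec (str1 str2 : List Char) (m n : Nat) :
    ∀ k, k ≤ m →
      (let dp' := (List.range k).foldl (fun dp i0 => (List.range n).foldl (pvStep str1 str2 i0) dp) (pvInit m n)
       dp'.length = m + 1 ∧
       (∀ kk, kk ≤ m → (dp'.getD kk []).length = n + 1) ∧
       (∀ i j, i ≤ k → j ≤ n → pvG dp' i j = pvLevRec str1 str2 i j) ∧
       (∀ i, k < i → i ≤ m → pvG dp' i 0 = i)) := by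
  intro k
  induction k with
  | zero =>
    intro _
    obtain ⟨h1, h2, h3, h4, h5⟩ := pvInit_spec m n
    simp only [List.range_zero, List.foldl_nil]
    refine ⟨h1, h2, ?_, fun i _ him => h3 i him⟩
    intro i j hi hj
    interval_cases i
    rw [h4 j hj, pvLevRec]
  | succ k ih =>
    intro hk
    obtain ⟨h1, h2, h3, h4⟩ := ih (Nat.le_of_succ_le hk)
    rw [List.range_succ, List.foldl_append, List.foldl_cons, List.foldl_nil]
    generalize hdpk : (List.range k).foldl (fun dp i0 => (List.range n).foldl (pvStep str1 str2 i0) dp) (pvInit m n) = dpk at *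
    obtain ⟨g1, g2, g3, g4, g5⟩ := pvInner_spec str1 str2 m n k (by omega) dpk h1 h2
      (fun j hj => h3 k j (le_refl _) hj) (h4 (k + 1) (by omega) (by omega)) n (le_refl _)
    refine ⟨g1, g3, ?_, ?_⟩
    · intro i j hi hj
      by_cases hik : i = k + 1
      · subst hik; exact g4 j hj
      · rw [pvG, g2 i hik]
        exact h3 i j (by omega) hj
    · intro i hi him
      rw [pvG, g2 i (by omega)]
      exact h4 i (by omega) him

-- A's matrix cell (m, n) is B's recursion at (m, n)
theorem pvLev_eq (str1 str2 : List Char) : pvLevMatrix str1 str2 = pvLevMemo str1 str2 := by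
  obtain ⟨h1, h2, h3, h4⟩ :=
    pvOuter_spec str1 str2 str1.length str2.length str1.length (le_refl _)
  exact h3 str1.length str2.length (le_refl _) (le_refl _)

-- ===== VERDICT (by name: the statement is the Claim_ definition above) =====
theorem categorize_column_spec : Claim_equal_categorize_column := by
  intro column_name categories _ _
  unfold Spec_categorize_column categorize_column categorize_column_alt
  simp only [pvLev_eq]
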